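-- pv_equiv track=rewrite | github.com/sfu-natlang/HMM-Aligner | src/models/Old/HMMBase.py | maxTargetSentenceLength
-- ===== SOURCE A (Python) =====
-- from collections import defaultdict
--
-- def maxTargetSentenceLength(dataset):
--     maxLength = 0
--     eLengthSet = defaultdict(int)
--     for (f, e, alignment) in dataset:
--         tempLength = len(e)
--         if tempLength > maxLength:
--             maxLength = tempLength
--         eLengthSet[tempLength] += 1
--     return (maxLength, eLengthSet)
-- ===== SOURCE B (Python) =====
-- from collections import defaultdict
--
-- def maxTargetSentenceLength(dataset):
--     lengths = [len(e) for (f, e, alignment) in dataset]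
--     eLengthSet = defaultdict(int)
--     for n in dict.fromkeys(lengths):
--         eLengthSet[n] = lengths.count(n)
--     return (max(lengths, default=0), eLengthSet)
-- ===== Notes on version B (the rewrite author's own statement) =====
-- stated objective: alternative
-- what changed: B materialises the list of target lengths, dedups it with dict.fromkeys, and fills the histogram by counting each distinct length with list.count, taking the maximum over the lengths list afterwards, instead of A's single pass that increments a counter and tracks a running maximum per element.
import Mathlib
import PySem

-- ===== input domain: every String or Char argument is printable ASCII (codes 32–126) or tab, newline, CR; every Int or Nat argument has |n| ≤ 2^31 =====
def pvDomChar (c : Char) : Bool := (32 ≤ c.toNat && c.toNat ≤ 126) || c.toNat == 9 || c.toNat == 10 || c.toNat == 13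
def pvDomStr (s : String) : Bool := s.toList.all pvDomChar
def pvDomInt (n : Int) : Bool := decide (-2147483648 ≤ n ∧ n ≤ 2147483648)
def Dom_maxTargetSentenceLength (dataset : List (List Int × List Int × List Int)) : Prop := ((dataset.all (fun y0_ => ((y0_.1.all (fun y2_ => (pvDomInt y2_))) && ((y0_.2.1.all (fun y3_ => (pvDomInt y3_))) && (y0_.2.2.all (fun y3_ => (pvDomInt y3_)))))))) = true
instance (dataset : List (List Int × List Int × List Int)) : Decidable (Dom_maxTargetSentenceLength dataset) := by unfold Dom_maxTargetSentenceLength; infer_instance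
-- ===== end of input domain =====

-- B extracts the list of target lengths, dedups it, and fills the histogram by counting each
-- distinct length with list.count (max taken over the lengths list), instead of A's single
-- incrementing pass with a running maximum. Alternative decomposition, same results.

-- ===== PORT A =====
-- the loop tracks the running maximum and increments the histogram per element
def maxTargetSentenceLength (dataset : List (List Int × List Int × List Int)) : Int × (List (Int × Int)) :=
  let st := dataset.foldl
    (fun (st : Int × PySem.Dict Int Int) fea =>
      let tempLength : Int := fea.2.1.length
      let maxLength := if tempLength > st.1 then tempLength else st.1
      (maxLength, st.2.modify tempLength 0 (· + 1)))
    ((0 : Int), PySem.Dict.empty)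
  (st.1, st.2.items)

-- ===== PORT B =====
-- lengths list; dict.fromkeys dedup; eLengthSet[n] = lengths.count(n); max(lengths, default=0)
def maxTargetSentenceLength_alt (dataset : List (List Int × List Int × List Int)) : Int × (List (Int × Int)) :=
  let lengths : List Int := dataset.map (fun fea => (fea.2.1.length : Int))
  let eLengthSet := (PySem.List.dedup lengths).foldl
    (fun (d : PySem.Dict Int Int) n => d.insert n ((PySem.List.count lengths n : Nat) : Int))
    PySem.Dict.empty
  let maxLength : Int :=
    match PySem.List.max? lengths (fun x => x) with
    | some m => m
    | none => 0
  (maxLength, eLengthSet.items)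

-- ===== PRECONDITION & SPEC =====
def Spec_maxTargetSentenceLength (dataset : List (List Int × List Int × List Int)) (out : Int × (List (Int × Int))) : Prop := out = maxTargetSentenceLength_alt dataset
instance (dataset : List (List Int × List Int × List Int)) (out : Int × (List (Int × Int))) : Decidable (Spec_maxTargetSentenceLength dataset out) := by unfold Spec_maxTargetSentenceLength; infer_instance

-- ===== CLAIM (what is proved, stated in full; the proofs are below) =====
def Claim_equal_maxTargetSentenceLength : Prop := ∀ (dataset : List (List Int × List Int × List Int)), Dom_maxTargetSentenceLength dataset → Spec_maxTargetSentenceLength dataset (maxTargetSentenceLength dataset)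

-- ===== LEMMAS AND PROOFS =====

-- A's paired fold splits: its dict component is the counter of the lengths list
lemma pvSndEq (ds : List (List Int × List Int × List Int)) :
    ∀ (m : Int) (d : PySem.Dict Int Int),
    (ds.foldl (fun (st : Int × PySem.Dict Int Int) fea =>
        (if (fea.2.1.length : Int) > st.1 then (fea.2.1.length : Int) else st.1,
         st.2.modify (fea.2.1.length : Int) 0 (· + 1))) (m, d)).2
    = (ds.map (fun fea => (fea.2.1.length : Int))).foldl
        (fun (d : PySem.Dict Int Int) n => d.modify n 0 (· + 1)) d := by
  induction ds with
  | nil => intro m d; rfl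
  | cons x t ih => intro m d; simpa using ih _ _

-- A's running maximum is a fold of max over the lengths
lemma pvFstEq (ds : List (List Int × List Int × List Int)) :
    ∀ (m : Int) (d : PySem.Dict Int Int),
    (ds.foldl (fun (st : Int × PySem.Dict Int Int) fea =>
        (if (fea.2.1.length : Int) > st.1 then (fea.2.1.length : Int) else st.1,
         st.2.modify (fea.2.1.length : Int) 0 (· + 1))) (m, d)).1
    = (ds.map (fun fea => (fea.2.1.length : Int))).foldl
        (fun a t => if t > a then t else a) m := by
  induction ds with
  | nil => intro m d; rfl
  | cons x t ih => intro m d; simpa using ih _ _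

lemma pvFoldMaxGe (L : List Int) : ∀ (a : Int),
    a ≤ L.foldl (fun x t => if t > x then t else x) a ∧
    ∀ y ∈ L, y ≤ L.foldl (fun x t => if t > x then t else x) a := by
  induction L with
  | nil => intro a; simp
  | cons x t ih =>
    intro a
    obtain ⟨h1, h2⟩ := ih (if x > a then x else a)
    have hb : a ≤ (if x > a then x else a) ∧ x ≤ (if x > a then x else a) := by
      split <;> omega
    refine ⟨?_, ?_⟩
    · simp only [List.foldl_cons]; exact le_trans hb.1 h1
    · intro y hy
      simp only [List.foldl_cons]
      rcases List.mem_cons.mp hy with rfl | h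
      · exact le_trans hb.2 h1
      · exact h2 y h

lemma pvFoldMaxMem (L : List Int) : ∀ (a : Int),
    L.foldl (fun x t => if t > x then t else x) a = a ∨
    L.foldl (fun x t => if t > x then t else x) a ∈ L := by
  induction L with
  | nil => intro a; simp
  | cons x t ih =>
    intro a
    simp only [List.foldl_cons]
    rcases ih (if x > a then x else a) with h | h
    · rw [h]
      split
      · exact Or.inr (List.mem_cons_self)
      · exact Or.inl rfl
    · exact Or.inr (List.mem_cons_of_mem x h)

lemma pvFoldMaxEq (L : List Int) (m : Int) (hmem : m ∈ L) (hub : ∀ y ∈ L, y ≤ m)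
    (h0 : (0 : Int) ≤ m) :
    L.foldl (fun x t => if t > x then t else x) 0 = m := by
  obtain ⟨h1, h2⟩ := pvFoldMaxGe L 0
  have h3 := pvFoldMaxMem L 0
  have h4 := h2 m hmem
  rcases h3 with h | h
  · omega
  · have := hub _ h; omega

-- ===== VERDICT (by name: the statement is the Claim_ definition above) =====
theorem maxTargetSentenceLength_spec : Claim_equal_maxTargetSentenceLength := by
  intro ds _
  unfold Spec_maxTargetSentenceLength maxTargetSentenceLength maxTargetSentenceLength_alt
  simp only []
  set L : List Int := ds.map (fun fea => (fea.2.1.length : Int)) with hL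
  refine Prod.ext ?_ ?_
  · -- first components
    rw [pvFstEq ds 0 PySem.Dict.empty]
    cases hmax : PySem.List.max? L (fun x => x) with
    | none =>
      have : L = [] := (PySem.List.max?_eq_none_iff _ _).mp hmax
      simp [← hL, this]
    | some m =>
      have hmem : m ∈ L := PySem.List.max?_mem hmax
      have hub : ∀ y ∈ L, y ≤ m := fun y hy => PySem.List.max?_isMax hmax y hy
      have h0 : (0 : Int) ≤ m := by
        rcases List.mem_map.mp (hL ▸ hmem) with ⟨fea, _, hfe⟩
        omega
      simp [← hL] at *
      exact pvFoldMaxEq L m hmem hub h0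
  · -- second components
    rw [pvSndEq ds 0 PySem.Dict.empty]
    have hA : (L.foldl (fun (d : PySem.Dict Int Int) n => d.modify n 0 (· + 1))
        PySem.Dict.empty).items
        = (PySem.Set.ofList L).map (fun k => (k, (L.count k : Int))) := by
      have := PySem.Dict.items_counter L
      simpa [PySem.Dict.counter_eq_foldl] using this
    have hfresh : ∀ a ∈ PySem.List.dedup L,
        (PySem.Dict.empty : PySem.Dict Int Int).contains a = false := by
      intro a _; rfl
    have hB := PySem.Dict.items_foldl_insert_fresh (l := PySem.List.dedup L)
      (d := (PySem.Dict.empty : PySem.Dict Int Int))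
      (k := fun n => n) (v := fun n => ((PySem.List.count L n : Nat) : Int))
      hfresh (by simp)
    simp only [← hL]
    rw [hA, hB]
    simp [PySem.List.dedup_eq_ofList, PySem.List.count_eq, show (PySem.Dict.empty : PySem.Dict Int Int).items = [] from rfl]
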